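-- pv_equiv track=rewrite | github.com/hinoyat/SWEA_Algorithms | RE_A/misaeng.py | change_val
-- ===== SOURCE A (Python) =====
-- def change_val(i, j, lst):
--
--     max_v = 0
--     v = 0
--     d = 0
--     cnt = 0
--     for nv, nd in lst:
--         max_v = max(max_v, nv)
--         v += nv
--         if nv >= max_v:
--             d = nd
--         cnt += 1
--
--     if cnt == 1:
--         return i, j, v, d
--     else:
--         return i, j, v, d
-- ===== SOURCE B (Python) =====
-- def change_val(i, j, lst):
--     v = sum(nv for nv, _ in lst)
--     m = max((nv for nv, _ in lst), default=0)
--     if m < 0: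
--         m = 0
--     d = next((nd for nv, nd in reversed(lst) if nv == m), 0)
--     return i, j, v, d
-- ===== Notes on version B (the rewrite author's own statement) =====
-- stated objective: simpler
-- what changed: A's single fused loop carrying (running max, sum, d, count) is split into separate aggregate passes: a sum, a 0-floored max, and a back-to-front search for the last element whose value equals that max; the dead count/branching is dropped.
import Mathlib
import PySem

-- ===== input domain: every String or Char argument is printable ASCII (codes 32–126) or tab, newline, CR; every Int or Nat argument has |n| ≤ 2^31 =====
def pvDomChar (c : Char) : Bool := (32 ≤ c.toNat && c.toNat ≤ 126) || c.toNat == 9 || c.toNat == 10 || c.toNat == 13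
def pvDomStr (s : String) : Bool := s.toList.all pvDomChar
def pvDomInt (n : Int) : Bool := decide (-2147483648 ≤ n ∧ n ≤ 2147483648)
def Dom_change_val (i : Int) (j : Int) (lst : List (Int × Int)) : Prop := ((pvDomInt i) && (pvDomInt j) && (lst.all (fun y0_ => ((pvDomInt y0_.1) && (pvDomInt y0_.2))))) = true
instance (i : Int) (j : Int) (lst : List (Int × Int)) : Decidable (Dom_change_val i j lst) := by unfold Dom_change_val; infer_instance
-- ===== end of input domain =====

-- B replaces A's single fused running-max loop by aggregate passes (sum, 0-floored max, then a
-- back-to-front search for the last element achieving the max): simpler decomposition, same cost.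

-- ===== PORT A =====
def change_val (i : Int) (j : Int) (lst : List (Int × Int)) : Int × Int × Int × Int :=
  -- state (max_v, v, d, cnt), initial (0, 0, 0, 0)
  let st := lst.foldl (fun (s : Int × Int × Int × Int) p =>
    let max_v := max s.1 p.1
    let v := s.2.1 + p.1
    let d := if p.1 ≥ max_v then p.2 else s.2.2.1
    let cnt := s.2.2.2 + 1
    (max_v, v, d, cnt)) (0, 0, 0, 0)
  if st.2.2.2 == 1 then (i, j, st.2.1, st.2.2.1) else (i, j, st.2.1, st.2.2.1)

-- ===== PORT B =====
def change_val_alt (i : Int) (j : Int) (lst : List (Int × Int)) : Int × Int × Int × Int :=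
  let v := (lst.map Prod.fst).sum
  let m0 := (PySem.List.max? (lst.map Prod.fst) (fun x => x)).getD 0
  let m := if m0 < 0 then 0 else m0
  let d := match lst.reverse.find? (fun p => p.1 == m) with
           | some p => p.2
           | none => 0
  (i, j, v, d)

-- ===== PRECONDITION & SPEC =====
def Spec_change_val (i : Int) (j : Int) (lst : List (Int × Int)) (out : Int × Int × Int × Int) : Prop := out = change_val_alt i j lst
instance (i : Int) (j : Int) (lst : List (Int × Int)) (out : Int × Int × Int × Int) : Decidable (Spec_change_val i j lst out) := by unfold Spec_change_val; infer_instance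

-- ===== CLAIM (what is proved, stated in full; the proofs are below) =====
def Claim_equal_change_val : Prop := ∀ (i : Int) (j : Int) (lst : List (Int × Int)), Dom_change_val i j lst → Spec_change_val i j lst (change_val i j lst)

-- ===== LEMMAS AND PROOFS =====

/-- A's loop body. -/
def pvStepA (s : Int × Int × Int × Int) (p : Int × Int) : Int × Int × Int × Int :=
  let max_v := max s.1 p.1
  let v := s.2.1 + p.1
  let d := if p.1 ≥ max_v then p.2 else s.2.2.1
  let cnt := s.2.2.2 + 1
  (max_v, v, d, cnt)

/-- The 0-floored maximum of the first components (A's running max after the whole list). -/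
def pvM (lst : List (Int × Int)) : Int := (lst.map Prod.fst).foldl max 0

/-- B's d: last-match search. -/
def pvD (lst : List (Int × Int)) (m : Int) : Int :=
  match lst.reverse.find? (fun p => p.1 == m) with
  | some p => p.2
  | none => 0

lemma foldl_max_out (l : List Int) (a b : Int) :
    l.foldl max (max a b) = max a (l.foldl max b) := by
  induction l generalizing b with
  | nil => rfl
  | cons c t ih =>
      simp only [List.foldl_cons, max_assoc, ih]

lemma pvM_append (lst : List (Int × Int)) (x : Int × Int) :
    pvM (lst ++ [x]) = max (pvM lst) x.1 := by
  simp [pvM, List.foldl_append]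

lemma stateA_eq (lst : List (Int × Int)) :
    lst.foldl pvStepA (0, 0, 0, 0)
      = (pvM lst, (lst.map Prod.fst).sum, pvD lst (pvM lst), (lst.length : Int)) := by
  induction lst using List.reverseRecOn with
  | nil => rfl
  | append_singleton t x ih =>
      rw [List.foldl_append, ih]
      have hM := pvM_append t x
      by_cases h : x.1 ≥ max (pvM t) x.1
      · have hx : x.1 = max (pvM t) x.1 := le_antisymm (le_max_right _ _) h
        simp [pvStepA, pvD, hM, ← hx]
      · have hM' : max (pvM t) x.1 = pvM t := by
          rcases max_cases (pvM t) x.1 with ⟨he, _⟩ | ⟨he, _⟩ <;> omega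
        have hlt : x.1 < pvM t := by
          have := le_max_right (pvM t) x.1; omega
        have hx : (x.1 == pvM t) = false := by simp; omega
        simp [pvStepA, pvD, hM, hM', hx, not_le.mpr hlt]

lemma pvM_eq_floor (lst : List (Int × Int)) :
    pvM lst
      = (let m0 := (PySem.List.max? (lst.map Prod.fst) (fun x => x)).getD 0
         if m0 < 0 then 0 else m0) := by
  cases lst with
  | nil => rfl
  | cons p t =>
      have h := PySem.List.max?_id_cons (x := p.1) (t := t.map Prod.fst)
      simp only [List.map_cons, h, pvM, List.foldl_cons, Option.getD_some]
      have h2 : (t.map Prod.fst).foldl max (max 0 p.1)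
          = max 0 ((t.map Prod.fst).foldl max p.1) := foldl_max_out _ 0 p.1
      rw [h2]
      rcases max_cases 0 ((t.map Prod.fst).foldl max p.1) with ⟨he, hle⟩ | ⟨he, hlt⟩ <;>
        simp [he] <;> omega

-- ===== VERDICT (by name: the statement is the Claim_ definition above) =====
theorem change_val_spec : Claim_equal_change_val := by
  intro i j lst _
  show change_val i j lst = change_val_alt i j lst
  unfold change_val change_val_alt
  simp only []
  rw [show (fun (s : Int × Int × Int × Int) p =>
        let max_v := max s.1 p.1
        let v := s.2.1 + p.1
        let d := if p.1 ≥ max_v then p.2 else s.2.2.1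
        let cnt := s.2.2.2 + 1
        (max_v, v, d, cnt)) = pvStepA from rfl]
  rw [stateA_eq, ← pvM_eq_floor]
  by_cases h : ((lst.length : Int) == 1) = true <;> simp [h, pvD]
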